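-- pv_equiv track=rewrite | github.com/ssfoley/DSLEUTH | visualization/venv/lib/python3.8/site-packages/arcgis/learn/_utils/pointcloud_data.py | remap_classes
-- ===== SOURCE A (Python) =====
-- def remap_classes(class_values):
--     flag = False
--     if class_values[0] != 0:
--         return True
--     for i in range(len(class_values) - 1):
--         if class_values[i] + 1 != class_values[i+1]:
--             return True
--     return flag
-- ===== SOURCE B (Python) =====
-- def remap_classes(class_values):
--     if class_values[0] != 0:
--         return True
--     def differs(xs, k):
--         # True iff xs != [k, k+1, ..., k+len(xs)-1], by divide and conquer
--         n = len(xs)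
--         if n == 0:
--             return False
--         if n == 1:
--             return xs[0] != k
--         m = n // 2
--         return differs(xs[:m], k) or differs(xs[m:], k + m)
--     return differs(class_values, 0)
-- ===== Notes on version B (the rewrite author's own statement) =====
-- stated objective: alternative
-- what changed: The linear pairwise-difference scan with early returns is replaced by a recursive divide-and-conquer check: the list equals the sequence k..k+n-1 iff its two halves equal their half-sequences, recursing to singletons.
import Mathlib
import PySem

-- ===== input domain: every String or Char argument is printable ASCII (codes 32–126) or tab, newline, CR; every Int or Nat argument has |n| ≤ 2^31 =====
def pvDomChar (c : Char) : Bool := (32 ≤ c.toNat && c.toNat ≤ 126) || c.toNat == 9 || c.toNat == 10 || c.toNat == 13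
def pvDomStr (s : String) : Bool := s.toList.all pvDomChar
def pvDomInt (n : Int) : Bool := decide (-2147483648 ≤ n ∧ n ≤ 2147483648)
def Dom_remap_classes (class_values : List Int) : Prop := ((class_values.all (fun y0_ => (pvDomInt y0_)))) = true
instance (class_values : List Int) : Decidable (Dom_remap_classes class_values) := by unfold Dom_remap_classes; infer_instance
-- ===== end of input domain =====

-- B replaces the linear pairwise scan by a divide-and-conquer check ("xs equals k..k+len-1
-- iff each half equals its half-range"): a genuinely different decomposition, same O(n) cost.

-- ===== PORT A =====
-- A: flag = False; if class_values[0] != 0: return True; scan consecutive pairs via range(len-1),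
-- early return True on a break in the chain; else return flag.
-- Indices i and i+1 are in range on every iteration, so xs[i] is ported as pyGetD (default 0 unreachable); exact there.
def remap_classes (class_values : List Int) : Bool :=
  let flag := false
  match PySem.List.pyGet? class_values 0 with
  | none => false  -- IndexError on the empty list; excluded by Pre_
  | some v =>
    if v ≠ 0 then true
    else if (PySem.List.pyRange 0 ((class_values.length : Int) - 1) 1).any
        (fun i => PySem.List.pyGetD class_values i 0 + 1 ≠ PySem.List.pyGetD class_values (i + 1) 0)
      then true
      else flag

-- ===== PORT B =====
-- differs(xs, k): True iff xs ≠ [k, k+1, ..., k+len(xs)-1], by divide and conquer on halves.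
def pvDiffers (xs : List Int) (k : Int) : Bool :=
  let n : Int := (xs.length : Int)
  if n = 0 then false
  else if n = 1 then decide (PySem.List.pyGetD xs 0 0 ≠ k)
  else
    let m := PySem.Int.floordiv n 2
    pvDiffers (PySem.List.slice xs none (some m)) k ||
    pvDiffers (PySem.List.slice xs (some m) none) (k + m)
termination_by xs.length
decreasing_by
  · have hn : 2 ≤ xs.length := by omega
    have hm : PySem.Int.floordiv (xs.length : Int) 2 = ((xs.length / 2 : Nat) : Int) := by
      rw [PySem.Int.floordiv_eq_ediv_of_pos (by norm_num)]
      omega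
    rw [hm, PySem.List.slice_to_natCast]
    simp
    omega
  · have hn : 2 ≤ xs.length := by omega
    have hm : PySem.Int.floordiv (xs.length : Int) 2 = ((xs.length / 2 : Nat) : Int) := by
      rw [PySem.Int.floordiv_eq_ediv_of_pos (by norm_num)]
      omega
    rw [hm, PySem.List.slice_from_natCast]
    simp
    omega

def remap_classes_alt (class_values : List Int) : Bool :=
  match PySem.List.pyGet? class_values 0 with
  | none => false  -- IndexError on the empty list; excluded by Pre_
  | some v =>
    if v ≠ 0 then true
    else pvDiffers class_values 0

-- ===== PRECONDITION & SPEC =====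
-- A (and B) raise IndexError on the empty list (class_values[0]); Pre_ excludes exactly that input.
def Pre_remap_classes (class_values : List Int) : Prop := class_values ≠ []
instance (class_values : List Int) : Decidable (Pre_remap_classes class_values) := by
  unfold Pre_remap_classes; infer_instance
def pvWitness_remap_classes : List Int := [0, 1, 2]
def Spec_remap_classes (class_values : List Int) (out : Bool) : Prop := out = remap_classes_alt class_values
instance (class_values : List Int) (out : Bool) : Decidable (Spec_remap_classes class_values out) := by
  unfold Spec_remap_classes; infer_instance

-- ===== CLAIM (what is proved, stated in full; the proofs are below) =====
def Claim_equal_remap_classes : Prop := ∀ (class_values : List Int), Dom_remap_classes class_values → Pre_remap_classes class_values → Spec_remap_classes class_values (remap_classes class_values)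

-- ===== LEMMAS AND PROOFS =====

-- pvDiffers xs k is false exactly when xs is pointwise the sequence k, k+1, …
lemma pvDiffers_false_iff (n : Nat) (xs : List Int) (k : Int) (hlen : xs.length = n) :
    pvDiffers xs k = false ↔ ∀ i : Nat, (h : i < xs.length) → xs[i] = k + i := by
  induction n using Nat.strong_induction_on generalizing xs k with
  | _ n ih =>
  rw [pvDiffers]
  by_cases h0 : xs.length = 0
  · simp [h0]
  · by_cases h1 : xs.length = 1
    · match xs, h1 with
      | [x], _ =>
        simp [PySem.List.pyGetD]
    · have hn2 : 2 ≤ xs.length := by omega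
      have hm : PySem.Int.floordiv (xs.length : Int) 2 = ((xs.length / 2 : Nat) : Int) := by
        rw [PySem.Int.floordiv_eq_ediv_of_pos (by norm_num)]; omega
      simp only [show ¬((xs.length : Int) = 0) by exact_mod_cast h0,
        show ¬((xs.length : Int) = 1) by exact_mod_cast h1, if_false, hm,
        PySem.List.slice_to_natCast, PySem.List.slice_from_natCast]
      set m := xs.length / 2 with hmdef
      have hm1 : 1 ≤ m := by omega
      have hmlt : m < xs.length := by omega
      have hlt : (xs.take m).length < n := by simp; omega
      have hld : (xs.drop m).length < n := by simp; omega
      rw [Bool.or_eq_false_iff,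
        ih _ hlt (xs.take m) k rfl,
        ih _ hld (xs.drop m) (k + (m : Int)) rfl]
      constructor
      · rintro ⟨hL, hR⟩ i hi
        by_cases hcase : i < m
        · have := hL i (by simp; omega)
          simpa [List.getElem_take] using this
        · obtain ⟨j, rfl⟩ : ∃ j, i = m + j := ⟨i - m, by omega⟩
          have hj : j < (xs.drop m).length := by simp; omega
          have := hR j hj
          simp only [List.getElem_drop] at this
          rw [this]
          push_cast
          ring
      · intro hall
        refine ⟨?_, ?_⟩
        · intro i hi
          have hi' : i < xs.length := by simp at hi; omega
          rw [List.getElem_take]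
          exact hall i hi'
        · intro i hi
          have hi' : m + i < xs.length := by simp at hi; omega
          rw [List.getElem_drop]
          have := hall (m + i) hi'
          rw [this]
          push_cast
          ring

-- ===== VERDICT (by name: the statement is the Claim_ definition above) =====
theorem remap_classes_spec : Claim_equal_remap_classes := by
  intro cv _ hne
  unfold Pre_remap_classes at hne
  unfold Spec_remap_classes remap_classes remap_classes_alt
  match cv, hne with
  | x :: xs, hne =>
  set cv := x :: xs with hcvdef
  have hlen : 0 < cv.length := by simp [hcvdef]
  rw [PySem.List.pyGet?_zero_cons]
  simp only
  by_cases h0 : x ≠ 0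
  · simp [h0]
  · rw [not_not] at h0
    simp only [h0, ne_eq, not_true_eq_false, if_false]
    have h0' : cv[0]'hlen = 0 := by simp [hcvdef, h0]
    by_cases hany : (PySem.List.pyRange 0 ((cv.length : Int) - 1) 1).any
        (fun i => PySem.List.pyGetD cv i 0 + 1 ≠ PySem.List.pyGetD cv (i + 1) 0)
    · rw [if_pos hany]
      -- the scan found a break, so cv is not the sequence 0,1,2,…
      rw [List.any_eq_true] at hany
      obtain ⟨i, hmem, hbrk⟩ := hany
      rw [PySem.List.mem_pyRange_one] at hmem
      symm
      cases hpd : pvDiffers cv 0 with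
      | true => rfl
      | false =>
      exfalso
      have hall := (pvDiffers_false_iff cv.length cv 0 rfl).mp hpd
      apply of_decide_eq_true hbrk
      have hi1 : i.toNat + 1 < cv.length := by omega
      rw [PySem.List.pyGetD_eq_getElem cv 0 (by omega) (by omega),
          PySem.List.pyGetD_eq_getElem cv 0 (by omega) (by omega)]
      have hcast : (i + 1).toNat = i.toNat + 1 := by omega
      simp only [hcast]
      rw [hall i.toNat (by omega), hall (i.toNat + 1) hi1]
      push_cast
      omega
    · rw [if_neg hany]
      -- no break found: cv is exactly the sequence 0,1,2,…
      symm
      rw [pvDiffers_false_iff cv.length cv 0 rfl]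
      -- from the absence of any break, derive cv[i] = i by induction on i
      have hchain : ∀ i : Nat, (hi : i + 1 < cv.length) → cv[i]'(by omega) + 1 = cv[i + 1]'hi := by
        intro i hi
        by_contra hb
        apply hany
        rw [List.any_eq_true]
        refine ⟨(i : Int), ?_, ?_⟩
        · rw [PySem.List.mem_pyRange_one]
          constructor
          · positivity
          · omega
        · rw [decide_eq_true_iff]
          rw [PySem.List.pyGetD_eq_getElem cv 0 (by omega) (by omega),
              PySem.List.pyGetD_eq_getElem cv 0 (by omega) (by omega)]
          have hc1 : ((i : Int)).toNat = i := by omega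
          have hc2 : ((i : Int) + 1).toNat = i + 1 := by omega
          simp only [hc1, hc2]
          omega
      intro i
      induction i with
      | zero => intro _; simpa using h0'
      | succ k ihk =>
        intro hk
        have hstep := hchain k hk
        have hk' : k < cv.length := by omega
        rw [ihk hk'] at hstep
        push_cast
        omega
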